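-- pv_equiv track=rewrite | github.com/zh3r0/zh3r0-ctf | V2/crypto/1n_jection/admin/solve.py | n2nk
-- ===== SOURCE A (Python) =====
-- def isqrt(n):
--     u, s = n, n+1
--     while u < s:
--         s = u
--         t = s + n // s
--         u = t // 2
--     return s
--
-- def n2nk(n,k=2):
--     if k==1:
--         return [n]
--     m = (isqrt(8*n+1) - 1)//2
--     j = n-(m*(m+1))//2
--     i = m-j
--     if k==2:
--         return [i,j]
--     return n2nk(i,k-k//2) + n2nk(j,k//2)
-- ===== SOURCE B (Python) =====
-- def isqrt(n):
--     u, s = n, n+1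
--     while u < s:
--         s = u
--         t = s + n // s
--         u = t // 2
--     return s
--
-- def n2nk(n, k=2):
--     out = []
--     stack = [(n, k)]
--     while stack:
--         v, kk = stack.pop()
--         if kk == 1:
--             out.append(v)
--             continue
--         m = (isqrt(8*v+1) - 1)//2
--         j = v - (m*(m+1))//2
--         i = m - j
--         if kk == 2:
--             out.append(i)
--             out.append(j)
--         else:
--             stack.append((j, kk//2))
--             stack.append((i, kk - kk//2))
--     return out
-- ===== Notes on version B (the rewrite author's own statement) =====
-- stated objective: alternative
-- what changed: Replaced the recursive divide-and-concatenate unranking by an iterative explicit-stack worklist that pops (value,k) items, emits leaves into a single output list and pushes the right then left subproblem, so no recursion and no repeated list concatenation occur.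
import Mathlib
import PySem

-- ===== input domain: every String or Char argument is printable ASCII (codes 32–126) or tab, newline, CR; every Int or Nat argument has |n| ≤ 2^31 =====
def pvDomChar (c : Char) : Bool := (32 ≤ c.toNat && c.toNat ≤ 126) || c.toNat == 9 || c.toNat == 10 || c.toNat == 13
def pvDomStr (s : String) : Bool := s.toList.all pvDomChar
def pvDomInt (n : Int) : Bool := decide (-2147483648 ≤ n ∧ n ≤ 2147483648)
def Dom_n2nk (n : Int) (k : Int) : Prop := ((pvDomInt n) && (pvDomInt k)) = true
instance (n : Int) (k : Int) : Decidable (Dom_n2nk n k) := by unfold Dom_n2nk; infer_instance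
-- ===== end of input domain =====

-- B is a structurally different implementation: an explicit-stack worklist loop instead of
-- recursion with list concatenation; same values, same order. Shared helper isqrt is ported once.

-- ===== PORT A =====
-- while u < s: s = u; t = s + n // s; u = t // 2   — fuel is a totality guard only; on the
-- arguments reached from Pre_ (odd integers 8*v+1) the Python loop runs at most n.toNat + 4 times.
def isqrtLoop (n : Int) : Nat → Int → Int → Int
  | 0, _, s => s
  | fuel+1, u, s =>
    if u < s then
      isqrtLoop n fuel (PySem.Int.floordiv (u + PySem.Int.floordiv n u) 2) u
    else s

def isqrt (n : Int) : Int := isqrtLoop n (n.toNat + 4) n (n + 1)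

def n2nk (n : Int) (k : Int) : List Int :=
  if k == 1 then [n]
  else
    let m := PySem.Int.floordiv (isqrt (8*n+1) - 1) 2
    let j := n - PySem.Int.floordiv (m*(m+1)) 2
    let i := m - j
    if k == 2 then [i, j]
    else if _h : 3 ≤ k then  -- totality guard: for k ≤ 0 Python recurses forever (outside Pre_)
      n2nk i (k - PySem.Int.floordiv k 2) ++ n2nk j (PySem.Int.floordiv k 2)
    else []
termination_by k.toNat
decreasing_by
  · have h2 : PySem.Int.floordiv k 2 = k / 2 := PySem.Int.floordiv_eq_ediv_of_pos (by omega)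
    rw [h2]; omega
  · have h2 : PySem.Int.floordiv k 2 = k / 2 := PySem.Int.floordiv_eq_ediv_of_pos (by omega)
    rw [h2]; omega

-- ===== PORT B =====
-- the while-stack loop of Source B; fuel is a totality guard (the loop pops at most 2*k+1 items
-- when 1 ≤ k; for k ≤ 0 the Python loop never empties its stack — outside Pre_).
def n2nkLoop : Nat → List (Int × Int) → List Int → List Int
  | 0, _, out => out
  | _+1, [], out => out
  | fuel+1, (v, kk) :: stack, out =>
    if kk == 1 then n2nkLoop fuel stack (out ++ [v])
    else
      let m := PySem.Int.floordiv (isqrt (8*v+1) - 1) 2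
      let j := v - PySem.Int.floordiv (m*(m+1)) 2
      let i := m - j
      if kk == 2 then n2nkLoop fuel stack (out ++ [i, j])
      else n2nkLoop fuel ((i, kk - PySem.Int.floordiv kk 2) :: (j, PySem.Int.floordiv kk 2) :: stack) out

def n2nk_alt (n : Int) (k : Int) : List Int := n2nkLoop (2 * k.toNat + 1) [(n, k)] []

-- ===== PRECONDITION & SPEC =====
-- Pre_ excludes only k ≤ 0, where Python A never returns (unbounded recursion, RecursionError).
def Pre_n2nk (_n : Int) (k : Int) : Prop := 1 ≤ k
instance (n : Int) (k : Int) : Decidable (Pre_n2nk n k) := by unfold Pre_n2nk; infer_instance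
def pvWitness_n2nk : Int × Int := (11, 5)

def Spec_n2nk (n : Int) (k : Int) (out : List Int) : Prop := out = n2nk_alt n k
instance (n : Int) (k : Int) (out : List Int) : Decidable (Spec_n2nk n k out) := by unfold Spec_n2nk; infer_instance

-- ===== CLAIM (what is proved, stated in full; the proofs are below) =====
def Claim_equal_n2nk : Prop := ∀ (n : Int) (k : Int), Dom_n2nk n k → Pre_n2nk n k → Spec_n2nk n k (n2nk n k)

-- ===== LEMMAS AND PROOFS =====

-- number of loop iterations (pops) the stack machine spends on one work item (v, k), k ≥ 1
def popCount : Nat → Nat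
  | k => if k ≤ 2 then 1 else 1 + popCount (k - k / 2) + popCount (k / 2)
termination_by k => k
decreasing_by all_goals omega

lemma popCount_le (k : Nat) (hk : 1 ≤ k) : popCount k ≤ 2 * k - 1 := by
  induction k using Nat.strong_induction_on with
  | _ k ih =>
    rw [popCount]
    by_cases h : k ≤ 2
    · simp [h]; omega
    · have h1 := ih (k - k / 2) (by omega) (by omega)
      have h2 := ih (k / 2) (by omega) (by omega)
      simp [h]; omega

lemma popCount_pos (k : Nat) : 1 ≤ popCount k := by
  rw [popCount]; split <;> omega

lemma n2nk_one (v : Int) : n2nk v 1 = [v] := by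
  rw [n2nk]; norm_num

lemma n2nk_two (v : Int) : n2nk v 2 =
    [PySem.Int.floordiv (isqrt (8*v+1) - 1) 2 -
       (v - PySem.Int.floordiv
              (PySem.Int.floordiv (isqrt (8*v+1) - 1) 2 *
                (PySem.Int.floordiv (isqrt (8*v+1) - 1) 2 + 1)) 2),
     v - PySem.Int.floordiv
           (PySem.Int.floordiv (isqrt (8*v+1) - 1) 2 *
             (PySem.Int.floordiv (isqrt (8*v+1) - 1) 2 + 1)) 2] := by
  rw [n2nk]; norm_num

lemma n2nk_rec (v kk : Int) (h3 : 3 ≤ kk) : n2nk v kk =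
    n2nk (PySem.Int.floordiv (isqrt (8*v+1) - 1) 2 -
            (v - PySem.Int.floordiv
                   (PySem.Int.floordiv (isqrt (8*v+1) - 1) 2 *
                     (PySem.Int.floordiv (isqrt (8*v+1) - 1) 2 + 1)) 2))
         (kk - PySem.Int.floordiv kk 2) ++
    n2nk (v - PySem.Int.floordiv
                (PySem.Int.floordiv (isqrt (8*v+1) - 1) 2 *
                  (PySem.Int.floordiv (isqrt (8*v+1) - 1) 2 + 1)) 2)
         (PySem.Int.floordiv kk 2) := by
  rw [n2nk]
  rw [if_neg (by simp; omega), if_neg (by simp; omega), dif_pos h3]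

lemma floordiv_two_toNat (k : Int) (h : 3 ≤ k) :
    PySem.Int.floordiv k 2 = (k.toNat / 2 : Nat) ∧ (k - PySem.Int.floordiv k 2) = (k.toNat - k.toNat / 2 : Nat) := by
  rw [PySem.Int.floordiv_eq_ediv_of_pos (by omega)]; omega

lemma n2nkLoop_spec : ∀ (fuel : Nat) (stack : List (Int × Int)) (out : List Int),
    (∀ p ∈ stack, 1 ≤ p.2) →
    (stack.map (fun p => popCount p.2.toNat)).sum ≤ fuel →
    n2nkLoop fuel stack out = out ++ stack.flatMap (fun p => n2nk p.1 p.2) := by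
  intro fuel
  induction fuel with
  | zero =>
    intro stack out hpos hfuel
    cases stack with
    | nil => simp [n2nkLoop]
    | cons p rest =>
      exfalso
      have := popCount_pos p.2.toNat
      simp at hfuel; omega
  | succ f ih =>
    intro stack out hpos hfuel
    cases stack with
    | nil => simp [n2nkLoop]
    | cons p rest =>
      obtain ⟨v, kk⟩ := p
      have hk : 1 ≤ kk := hpos (v, kk) (by simp)
      simp only [List.map_cons, List.sum_cons] at hfuel
      by_cases h1 : kk = 1
      · subst h1
        rw [n2nkLoop, if_pos (by decide)]
        rw [ih rest (out ++ [v]) (fun p hp => hpos p (by simp [hp]))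
            (by have : popCount (1:Int).toNat = 1 := by rw [popCount]; norm_num
                omega)]
        simp [n2nk_one]
      · by_cases h2 : kk = 2
        · subst h2
          rw [n2nkLoop, if_neg (by decide), if_pos (by decide)]
          rw [ih rest _ (fun p hp => hpos p (by simp [hp]))
              (by have : popCount (2:Int).toNat = 1 := by rw [popCount]; norm_num
                  omega)]
          simp only [List.flatMap_cons]
          rw [n2nk_two]
          simp
        · have h3 : 3 ≤ kk := by omega
          obtain ⟨hd1, hd2⟩ := floordiv_two_toNat kk h3
          have hcnt : popCount kk.toNat =
              1 + popCount (kk.toNat - kk.toNat / 2) + popCount (kk.toNat / 2) := by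
            rw [popCount]; rw [if_neg (by omega)]
          rw [n2nkLoop]
          rw [if_neg (by simpa using h1), if_neg (by simpa using h2)]
          rw [ih _ out ?hpos ?hfuel]
          case hpos =>
            intro p hp
            simp only [List.mem_cons] at hp
            rcases hp with h | h | h
            · subst h; simp only; rw [hd2]; omega
            · subst h; simp only; rw [hd1]; omega
            · exact hpos p (by simp [h])
          case hfuel =>
            simp only [List.map_cons, List.sum_cons]
            rw [hd2, hd1]
            simp only [Int.toNat_natCast]
            omega
          simp only [List.flatMap_cons]
          rw [n2nk_rec v kk h3]
          simp

-- ===== VERDICT (by name: the statement is the Claim_ definition above) =====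
theorem n2nk_spec : Claim_equal_n2nk := by
  intro n k _ hk
  have hk' : 1 ≤ k := hk
  unfold Spec_n2nk n2nk_alt
  rw [n2nkLoop_spec (2 * k.toNat + 1) [(n, k)] [] (by simpa using hk')
      (by simpa using Nat.le_trans (popCount_le k.toNat (by omega)) (by omega))]
  simp
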